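-- pv_equiv track=rewrite | github.com/mprskalo01/study | Python_RPZP/jabuke.py | jabuke
-- ===== SOURCE A (Python) =====
-- def jabuke(n, k, s):
--     for x in range(1, s):
--         prijatelj_daje = x
--         ukupno_jabuka = x
--         for prijatelj in range(1, n):
--             prijatelj_daje += k
--             ukupno_jabuka += prijatelj_daje
--         if ukupno_jabuka == s:
--             return x
-- ===== SOURCE B (Python) =====
-- def jabuke(n, k, s):
--     # closed form: total apples for start x is n*x + k*n*(n-1)//2; solve for x
--     if n <= 1:
--         return None  # loop total equals x, which is always < s in A's search range
--     rem = s - k * n * (n - 1) // 2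
--     if rem % n != 0:
--         return None
--     x = rem // n
--     if 1 <= x < s:
--         return x
--     return None
-- ===== Notes on version B (the rewrite author's own statement) =====
-- stated objective: faster
-- what changed: Replaces the brute-force search over x in range(1,s) with nested summation loop by solving the closed-form equation n*x + k*n*(n-1)/2 = s for integer x directly.
import Mathlib
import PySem

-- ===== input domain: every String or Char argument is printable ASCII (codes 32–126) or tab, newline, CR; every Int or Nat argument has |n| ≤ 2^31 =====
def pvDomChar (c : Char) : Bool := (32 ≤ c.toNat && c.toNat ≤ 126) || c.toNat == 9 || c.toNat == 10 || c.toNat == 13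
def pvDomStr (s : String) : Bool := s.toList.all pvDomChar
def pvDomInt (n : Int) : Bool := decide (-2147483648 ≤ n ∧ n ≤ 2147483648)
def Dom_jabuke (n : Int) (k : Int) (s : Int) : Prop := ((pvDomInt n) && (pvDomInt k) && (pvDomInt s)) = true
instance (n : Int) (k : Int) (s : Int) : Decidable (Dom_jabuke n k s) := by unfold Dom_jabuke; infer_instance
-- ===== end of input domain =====

-- B replaces A's brute-force search over x in range(1, s) by solving the closed-form sum equation for x directly.

-- ===== PORT A =====
-- inner 'for prijatelj in range(1, n)' loop: state = (prijatelj_daje, ukupno_jabuka)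
def jabukeInner (n : Int) (k : Int) (x : Int) : Int :=
  ((PySem.List.pyRange 1 n 1).foldl (fun st _ => (st.1 + k, st.2 + st.1 + k)) (x, x)).2

-- outer 'for x in range(1, s)' with early return = first x whose total equals s
def jabuke (n : Int) (k : Int) (s : Int) : Option Int :=
  (PySem.List.pyRange 1 s 1).find? (fun x => jabukeInner n k x == s)

-- ===== PORT B =====
def jabuke_alt (n : Int) (k : Int) (s : Int) : Option Int :=
  if n ≤ 1 then none
  else if PySem.Int.mod (s - PySem.Int.floordiv (k * n * (n - 1)) 2) n ≠ 0 then none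
  else if 1 ≤ PySem.Int.floordiv (s - PySem.Int.floordiv (k * n * (n - 1)) 2) n ∧
            PySem.Int.floordiv (s - PySem.Int.floordiv (k * n * (n - 1)) 2) n < s then
    some (PySem.Int.floordiv (s - PySem.Int.floordiv (k * n * (n - 1)) 2) n)
  else none

-- ===== PRECONDITION & SPEC =====
def Spec_jabuke (n : Int) (k : Int) (s : Int) (out : Option Int) : Prop := out = jabuke_alt n k s
instance (n : Int) (k : Int) (s : Int) (out : Option Int) : Decidable (Spec_jabuke n k s out) := by unfold Spec_jabuke; infer_instance

-- ===== CLAIM (what is proved, stated in full; the proofs are below) =====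
def Claim_equal_jabuke : Prop := ∀ (n : Int) (k : Int) (s : Int), Dom_jabuke n k s → Spec_jabuke n k s (jabuke n k s)

-- ===== LEMMAS AND PROOFS =====

-- the inner fold only uses the length of the list it folds over (stated doubled to avoid division)
theorem jabuke_fold_eval (k : Int) : ∀ (l : List Int) (d u : Int),
    (l.foldl (fun st _ => (st.1 + k, st.2 + st.1 + k)) ((d, u) : Int × Int)).1 = d + l.length * k ∧
    2 * (l.foldl (fun st _ => (st.1 + k, st.2 + st.1 + k)) ((d, u) : Int × Int)).2 =
      2 * u + 2 * l.length * d + l.length * (l.length + 1) * k := by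
  intro l
  induction l with
  | nil => intro d u; simp
  | cons a t ih =>
      intro d u
      obtain ⟨ih1, ih2⟩ := ih (d + k) (u + d + k)
      simp only [List.foldl_cons, List.length_cons]
      constructor
      · rw [ih1]; push_cast; ring
      · rw [ih2]; push_cast; ring

-- closed form of the inner loop for n ≥ 2 : total = n*x + k*n*(n-1)/2, stated doubled
theorem jabukeInner_eval (n k x : Int) (hn : 2 ≤ n) :
    2 * jabukeInner n k x = 2 * n * x + k * n * (n - 1) := by
  unfold jabukeInner
  have h := (jabuke_fold_eval k (PySem.List.pyRange 1 n 1) x x).2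
  have hlen : ((PySem.List.pyRange 1 n 1).length : Int) = n - 1 := by
    rw [PySem.List.length_pyRange_one]; omega
  rw [h, hlen]; ring

theorem jabukeInner_small (n k x : Int) (hn : n ≤ 1) : jabukeInner n k x = x := by
  unfold jabukeInner
  rw [PySem.List.pyRange_one_eq_nil (by omega)]
  simp

-- find? returns the unique element the predicate characterises, if it is present
theorem find?_unique {l : List Int} {p : Int → Bool} {x₀ : Int}
    (hmem : x₀ ∈ l) (hp : ∀ y ∈ l, p y = true ↔ y = x₀) : l.find? p = some x₀ := by
  induction l with
  | nil => cases hmem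
  | cons a t ih =>
      by_cases ha : p a = true
      · have hax : a = x₀ := (hp a List.mem_cons_self).1 ha
        subst hax
        simp [List.find?, ha]
      · have hax : a ≠ x₀ := fun h => ha ((hp a List.mem_cons_self).2 h)
        have hmem' : x₀ ∈ t := by
          rcases List.mem_cons.1 hmem with h | h
          · exact absurd h.symm hax
          · exact h
        have hfa : p a = false := eq_false_of_ne_true ha
        simp only [List.find?_cons, hfa]
        exact ih hmem' (fun y hy => hp y (List.mem_cons_of_mem _ hy))

-- ===== VERDICT (by name: the statement is the Claim_ definition above) =====
theorem jabuke_spec : Claim_equal_jabuke := by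
  intro n k s _
  show jabuke n k s = jabuke_alt n k s
  unfold jabuke jabuke_alt
  by_cases hn : n ≤ 1
  · -- inner total is x, and every x in range(1,s) is < s, so A finds nothing
    rw [if_pos hn, List.find?_eq_none]
    intro x hx
    have hxs := (PySem.List.mem_pyRange_one.1 hx).2
    simp [jabukeInner_small n k x hn]
    omega
  · rw [if_neg hn]
    have hn2 : 2 ≤ n := by omega
    -- the halved triangular term is exact: n*(n-1) is even
    have hdvd2 : (2 : Int) ∣ k * n * (n - 1) := by
      have h1 : (2 : Int) ∣ (n - 1) * ((n - 1) + 1) := (Int.even_mul_succ_self (n - 1)).two_dvd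
      have h2 := h1.mul_left k
      have he : k * ((n - 1) * ((n - 1) + 1)) = k * n * (n - 1) := by ring
      rwa [he] at h2
    have hfd2 : PySem.Int.floordiv (k * n * (n - 1)) 2 = (k * n * (n - 1)) / 2 :=
      PySem.Int.floordiv_eq_ediv_of_pos (by omega)
    rw [hfd2]
    have hK : (k * n * (n - 1)) / 2 * 2 = k * n * (n - 1) := Int.ediv_mul_cancel hdvd2
    set K : Int := (k * n * (n - 1)) / 2 with hKdef
    set rem : Int := s - K with hrem
    -- predicate characterisation: total(x) = s  ↔  n * x = rem
    have hpred : ∀ x : Int, (jabukeInner n k x == s) = true ↔ n * x = rem := by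
      intro x
      rw [beq_iff_eq]
      have h2 := jabukeInner_eval n k x hn2
      constructor
      · intro h; rw [h] at h2; linarith
      · intro h; linarith
    by_cases hdvd : n ∣ rem
    · have hmod0 : PySem.Int.mod rem n = 0 := (PySem.Int.mod_eq_zero_iff_dvd rem n).2 hdvd
      rw [if_neg (by simp [hmod0])]
      have hfdn : PySem.Int.floordiv rem n = rem / n :=
        PySem.Int.floordiv_eq_ediv_of_pos (by omega)
      rw [hfdn]
      have hx0 : n * (rem / n) = rem := Int.mul_ediv_cancel' hdvd
      set x₀ : Int := rem / n with hx0def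
      by_cases hin : 1 ≤ x₀ ∧ x₀ < s
      · rw [if_pos hin]
        apply find?_unique (PySem.List.mem_pyRange_one.2 ⟨hin.1, hin.2⟩)
        intro y _
        rw [hpred y]
        constructor
        · intro h
          have hy : n * y = n * x₀ := by rw [hx0]; exact h
          exact mul_left_cancel₀ (by omega) hy
        · intro h; rw [h]; exact hx0
      · rw [if_neg hin, List.find?_eq_none]
        intro x hx
        have hxr := PySem.List.mem_pyRange_one.1 hx
        simp only [Bool.not_eq_true]
        by_contra hc
        have hnx := (hpred x).1 (by simpa using hc)
        have hxx : x = x₀ := by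
          have hy : n * x = n * x₀ := by rw [hx0]; exact hnx
          exact mul_left_cancel₀ (by omega) hy
        exact hin (hxx ▸ ⟨hxr.1, hxr.2⟩)
    · -- no integer solution at all
      have hmod : PySem.Int.mod rem n ≠ 0 := fun h => hdvd ((PySem.Int.mod_eq_zero_iff_dvd rem n).1 h)
      rw [if_pos (by simpa using hmod), List.find?_eq_none]
      intro x hx
      simp only [Bool.not_eq_true]
      by_contra hc
      have hnx := (hpred x).1 (by simpa using hc)
      exact hdvd ⟨x, hnx.symm⟩
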